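-- pv_equiv track=rewrite | github.com/Nazuna-io/storybench | professional_report_generator.py | extract_evaluator_quote
-- ===== SOURCE A (Python) =====
-- def extract_evaluator_quote(eval_text, criterion):
--     """Extract relevant evaluator quote for criterion."""
--     sentences = eval_text.split('.')
--
--     # Look for sentences mentioning this criterion
--     for sentence in sentences:
--         if criterion.replace('_', ' ') in sentence.lower() or criterion in sentence.lower():
--             clean_sentence = sentence.strip()
--             if len(clean_sentence) > 20 and len(clean_sentence) < 200:
--                 return clean_sentence
--
--     # Fallback: look for evaluative language
--     evaluative_terms = ['excellent', 'outstanding', 'effective', 'strong', 'compelling']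
--     for sentence in sentences:
--         if any(term in sentence.lower() for term in evaluative_terms):
--             clean_sentence = sentence.strip()
--             if len(clean_sentence) > 20 and len(clean_sentence) < 200:
--                 return clean_sentence
--
--     return "Assessment not available"
-- ===== SOURCE B (Python) =====
-- def extract_evaluator_quote(eval_text, criterion):
--     """Extract relevant evaluator quote for criterion (single pass, two slots)."""
--     crit_spaced = criterion.replace('_', ' ')
--     evaluative_terms = ['excellent', 'outstanding', 'effective', 'strong', 'compelling']
--     crit_hit = None
--     eval_hit = None
--     for sentence in eval_text.split('.'):
--         clean = sentence.strip()
--         if 20 < len(clean) < 200: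
--             low = sentence.lower()
--             if crit_hit is None and (crit_spaced in low or criterion in low):
--                 crit_hit = clean
--             if eval_hit is None and any(term in low for term in evaluative_terms):
--                 eval_hit = clean
--     if crit_hit is not None:
--         return crit_hit
--     if eval_hit is not None:
--         return eval_hit
--     return "Assessment not available"
-- ===== Notes on version B (the rewrite author's own statement) =====
-- stated objective: alternative
-- what changed: Replaces A's two sequential full scans (criterion scan, then evaluative-term scan) by a single pass over the sentence list that carries two first-match slots and picks the criterion slot over the evaluative slot at the end.
import Mathlib
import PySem

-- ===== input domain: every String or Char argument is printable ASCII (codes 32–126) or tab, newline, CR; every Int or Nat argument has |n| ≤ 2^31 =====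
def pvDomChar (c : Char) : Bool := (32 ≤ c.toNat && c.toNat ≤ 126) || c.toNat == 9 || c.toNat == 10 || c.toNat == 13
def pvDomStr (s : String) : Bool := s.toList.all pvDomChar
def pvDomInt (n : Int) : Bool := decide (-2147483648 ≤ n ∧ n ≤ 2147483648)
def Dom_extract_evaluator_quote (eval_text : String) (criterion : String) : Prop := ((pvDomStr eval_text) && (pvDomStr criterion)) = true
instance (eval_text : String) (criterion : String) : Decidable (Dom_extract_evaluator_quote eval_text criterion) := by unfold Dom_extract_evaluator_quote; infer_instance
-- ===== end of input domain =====

-- B makes one pass over the sentences with two first-match slots instead of A's two sequential scans; same return value, no speed claim.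

-- ===== PORT A =====
def pvEvalTerms : List String := ["excellent", "outstanding", "effective", "strong", "compelling"]

-- first loop of A: first sentence matching the criterion whose stripped form passes the length filter
def pvALoop1 (criterion : String) : List String → Option String
  | [] => none
  | s :: rest =>
    if PySem.Str.isIn (PySem.Str.replace criterion "_" " ") (PySem.Str.lower s)
        || PySem.Str.isIn criterion (PySem.Str.lower s) then
      let clean := PySem.Str.strip s
      if 20 < PySem.Str.len clean ∧ PySem.Str.len clean < 200 then some clean
      else pvALoop1 criterion rest
    else pvALoop1 criterion rest

-- second loop of A: first sentence containing an evaluative term, same length filter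
def pvALoop2 : List String → Option String
  | [] => none
  | s :: rest =>
    if pvEvalTerms.any (fun term => PySem.Str.isIn term (PySem.Str.lower s)) then
      let clean := PySem.Str.strip s
      if 20 < PySem.Str.len clean ∧ PySem.Str.len clean < 200 then some clean
      else pvALoop2 rest
    else pvALoop2 rest

def extract_evaluator_quote (eval_text : String) (criterion : String) : String :=
  -- split? is some because the separator "." is nonempty
  let sentences := (PySem.Str.split? eval_text ".").getD []
  match pvALoop1 criterion sentences with
  | some c => c
  | none =>
    match pvALoop2 sentences with
    | some c => c
    | none => "Assessment not available"

-- ===== PORT B =====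
-- one fold step: fill each still-empty slot on its first length-valid match
def pvBStep (criterion : String) (st : Option String × Option String) (sentence : String) :
    Option String × Option String :=
  let clean := PySem.Str.strip sentence
  if 20 < PySem.Str.len clean ∧ PySem.Str.len clean < 200 then
    let low := PySem.Str.lower sentence
    let c1 :=
      if st.1.isNone && (PySem.Str.isIn (PySem.Str.replace criterion "_" " ") low
          || PySem.Str.isIn criterion low) then some clean else st.1
    let c2 :=
      if st.2.isNone && pvEvalTerms.any (fun term => PySem.Str.isIn term low) then some clean
      else st.2
    (c1, c2)
  else st

def extract_evaluator_quote_alt (eval_text : String) (criterion : String) : String :=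
  -- split? is some because the separator "." is nonempty
  let slots := ((PySem.Str.split? eval_text ".").getD []).foldl (pvBStep criterion) (none, none)
  match slots.1 with
  | some c => c
  | none =>
    match slots.2 with
    | some c => c
    | none => "Assessment not available"

-- ===== PRECONDITION & SPEC =====
def Spec_extract_evaluator_quote (eval_text : String) (criterion : String) (out : String) : Prop := out = extract_evaluator_quote_alt eval_text criterion
instance (eval_text : String) (criterion : String) (out : String) : Decidable (Spec_extract_evaluator_quote eval_text criterion out) := by unfold Spec_extract_evaluator_quote; infer_instance

-- ===== CLAIM (what is proved, stated in full; the proofs are below) =====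
def Claim_equal_extract_evaluator_quote : Prop := ∀ (eval_text : String) (criterion : String), Dom_extract_evaluator_quote eval_text criterion → Spec_extract_evaluator_quote eval_text criterion (extract_evaluator_quote eval_text criterion)

-- ===== LEMMAS AND PROOFS =====

-- B's fold fills each empty slot with the value A's corresponding scan would find
theorem pvFold_eq (criterion : String) (l : List String) (c e : Option String) :
    l.foldl (pvBStep criterion) (c, e) =
      (c.orElse (fun _ => pvALoop1 criterion l), e.orElse (fun _ => pvALoop2 l)) := by
  induction l generalizing c e with
  | nil => cases c <;> cases e <;> rfl
  | cons s rest ih =>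
    by_cases hlen : 20 < (PySem.Chars.strip s.toList).length ∧ (PySem.Chars.strip s.toList).length < 200
    · by_cases hcm : PySem.Chars.isIn (PySem.Chars.replace criterion.toList ['_'] [' ']) (PySem.Chars.lower s.toList) = true
          ∨ PySem.Chars.isIn criterion.toList (PySem.Chars.lower s.toList) = true
      · by_cases hem : ∃ x ∈ pvEvalTerms, PySem.Chars.isIn x.toList (PySem.Chars.lower s.toList) = true
        · cases c <;> cases e <;>
            simp [pvBStep, pvALoop1, pvALoop2, hlen, hcm, hem, ih, Option.orElse]
        · cases c <;> cases e <;>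
            simp [pvBStep, pvALoop1, pvALoop2, hlen, hcm, hem, ih, Option.orElse]
      · by_cases hem : ∃ x ∈ pvEvalTerms, PySem.Chars.isIn x.toList (PySem.Chars.lower s.toList) = true
        · cases c <;> cases e <;>
            simp [pvBStep, pvALoop1, pvALoop2, hlen, hcm, hem, ih, Option.orElse]
        · cases c <;> cases e <;>
            simp [pvBStep, pvALoop1, pvALoop2, hlen, hcm, hem, ih, Option.orElse]
    · cases c <;> cases e <;>
        simp [pvBStep, pvALoop1, pvALoop2, hlen, ih, Option.orElse]

theorem extract_evaluator_quote_eq (eval_text criterion : String) :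
    extract_evaluator_quote eval_text criterion = extract_evaluator_quote_alt eval_text criterion := by
  unfold extract_evaluator_quote extract_evaluator_quote_alt
  rw [pvFold_eq]
  cases h1 : pvALoop1 criterion ((PySem.Str.split? eval_text ".").getD []) <;>
    cases h2 : pvALoop2 ((PySem.Str.split? eval_text ".").getD []) <;>
    simp [h1, h2, Option.orElse]

-- ===== VERDICT (by name: the statement is the Claim_ definition above) =====
theorem extract_evaluator_quote_spec : Claim_equal_extract_evaluator_quote := by
  intro eval_text criterion _
  unfold Spec_extract_evaluator_quote
  exact extract_evaluator_quote_eq eval_text criterion
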